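-- pv_equiv track=rewrite | github.com/cortega26/Foobar | Challenge #5.py | reorder2
-- ===== SOURCE A (Python) =====
-- def reorder2(m):
--     up_mat = []
--     down_mat = []
--     for i, array in enumerate(m):
--         if array.count(-1) == 0:
--             up_mat.append(array)
--         else:
--             down_mat.append(array)
--     fin = up_mat + down_mat
--     for array in fin:
--         for elem in array:
--             if elem == -1:
--                 elem = 1
--     return up_mat + down_mat
-- ===== SOURCE B (Python) =====
-- def reorder2(m):
--     # Stable sort on boolean key: rows without -1 (key False) come first,
--     # each group keeping its original order.
--     return sorted(m, key=lambda r: -1 in r)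
-- ===== Notes on version B (the rewrite author's own statement) =====
-- stated objective: idiomatic
-- what changed: Replaces the explicit two-list partition (and the dead inner mutation loop) with a single stable sort keyed on whether the row contains -1.
import Mathlib
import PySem

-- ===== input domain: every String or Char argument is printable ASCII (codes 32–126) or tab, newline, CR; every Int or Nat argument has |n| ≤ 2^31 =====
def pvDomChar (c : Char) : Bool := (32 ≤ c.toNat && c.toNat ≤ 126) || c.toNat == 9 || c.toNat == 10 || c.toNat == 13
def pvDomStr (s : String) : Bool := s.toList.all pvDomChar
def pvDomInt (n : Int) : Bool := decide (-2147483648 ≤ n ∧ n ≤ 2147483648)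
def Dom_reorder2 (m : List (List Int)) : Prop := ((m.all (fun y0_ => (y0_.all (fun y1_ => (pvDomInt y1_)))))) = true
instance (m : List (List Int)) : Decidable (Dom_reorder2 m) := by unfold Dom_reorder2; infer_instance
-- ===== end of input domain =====

-- B replaces A's explicit two-list partition (and the dead inner mutation loop) with a
-- single stable sort keyed on whether the row contains -1 (idiomatic, not faster).

-- ===== PORT A =====
def reorder2 (m : List (List Int)) : List (List Int) :=
  -- the for-loop over enumerate(m), accumulating (up_mat, down_mat)
  let p : List (List Int) × List (List Int) :=
    (PySem.List.enumerate m).foldl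
      (fun (st : List (List Int) × List (List Int)) iar =>
        if PySem.List.count iar.2 (-1) == 0 then (st.1 ++ [iar.2], st.2)
        else (st.1, st.2 ++ [iar.2]))
      ([], [])
  let _fin := p.1 ++ p.2  -- the second loop only rebinds the local 'elem'; it mutates nothing
  p.1 ++ p.2

-- ===== PORT B =====
def reorder2_alt (m : List (List Int)) : List (List Int) :=
  PySem.List.sorted m (fun r => r.contains (-1))

-- ===== PRECONDITION & SPEC =====
def Spec_reorder2 (m : List (List Int)) (out : List (List Int)) : Prop := out = reorder2_alt m
instance (m : List (List Int)) (out : List (List Int)) : Decidable (Spec_reorder2 m out) := by unfold Spec_reorder2; infer_instance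

-- ===== CLAIM (what is proved, stated in full; the proofs are below) =====
def Claim_equal_reorder2 : Prop := ∀ (m : List (List Int)), Dom_reorder2 m → Spec_reorder2 m (reorder2 m)

-- ===== LEMMAS AND PROOFS =====

-- A's loop (over enumerate) is the filter/filter partition
theorem foldl_partition (k : List Int → Bool) :
    ∀ (l : List (Int × List Int)) (as bs : List (List Int)),
      l.foldl (fun (st : List (List Int) × List (List Int)) iar =>
        if k iar.2 then (st.1 ++ [iar.2], st.2) else (st.1, st.2 ++ [iar.2])) (as, bs)
      = (as ++ (l.map (·.2)).filter k, bs ++ (l.map (·.2)).filter (fun r => !k r)) := by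
  intro l
  induction l with
  | nil => intro as bs; simp
  | cons x t ih =>
    intro as bs
    by_cases h : k x.2 = true <;> simp [List.foldl_cons, h, ih]

-- inserting into a (false-block ++ true-block) list keeps the shape
theorem insertBy_partition (k : List Int → Bool) (x : List Int) :
    ∀ (as bs : List (List Int)), (∀ a ∈ as, k a = false) → (∀ b ∈ bs, k b = true) →
      PySem.List.insertBy (fun a b => decide (k a < k b)) x (as ++ bs)
      = if k x then as ++ bs ++ [x] else as ++ [x] ++ bs := by
  intro as
  induction as with
  | nil =>
    intro bs _ hb
    by_cases hx : k x = true
    · have := PySem.List.insertBy_of_forall_not_before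
        (fun a b => decide (k a < k b)) x bs (by
          intro y hy; simp [hx, hb y hy])
      simp [hx] at this ⊢; simpa using this
    · cases bs with
      | nil => simp [PySem.List.insertBy, hx]
      | cons b bt =>
        have hb' : k b = true := hb b (by simp)
        simp only [Bool.not_eq_true] at hx
        simp [PySem.List.insertBy, hx, hb']
  | cons a at' ih =>
    intro bs ha hb
    have ha' : k a = false := ha a (by simp)
    have hstep : PySem.List.insertBy (fun a b => decide (k a < k b)) x ((a :: at') ++ bs)
        = a :: PySem.List.insertBy (fun a b => decide (k a < k b)) x (at' ++ bs) := by
      simp [PySem.List.insertBy, ha']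
    rw [hstep, ih bs (fun y hy => ha y (by simp [hy])) hb]
    by_cases hx : k x = true <;> simp [hx]

-- B's insertion sort with a boolean key is the same partition
theorem foldl_insertBy_partition (k : List Int → Bool) :
    ∀ (l : List (List Int)) (as bs : List (List Int)),
      (∀ a ∈ as, k a = false) → (∀ b ∈ bs, k b = true) →
      l.foldl (fun acc x => PySem.List.insertBy (fun a b => decide (k a < k b)) x acc) (as ++ bs)
      = (as ++ l.filter (fun r => !k r)) ++ (bs ++ l.filter k) := by
  intro l
  induction l with
  | nil => intro as bs _ _; simp
  | cons x t ih =>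
    intro as bs ha hb
    rw [List.foldl_cons, insertBy_partition k x as bs ha hb]
    by_cases hx : k x = true
    · have : as ++ bs ++ [x] = as ++ (bs ++ [x]) := by simp
      rw [if_pos hx, this, ih as (bs ++ [x])
        ha (by intro y hy; rcases List.mem_append.mp hy with h | h
               · exact hb y h
               · simp at h; simpa [h] using hx)]
      simp [hx]
    · have : as ++ [x] ++ bs = (as ++ [x]) ++ bs := by simp
      rw [if_neg hx, this, ih (as ++ [x]) bs
        (by intro y hy; rcases List.mem_append.mp hy with h | h
            · exact ha y h
            · simp at h; subst h; simpa using hx) hb]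
      simp [hx]

theorem count_eq_zero_iff_not_contains (r : List Int) :
    (List.count (-1) r == 0) = !decide ((-1 : Int) ∈ r) := by
  by_cases h : (-1 : Int) ∈ r
  · simp [List.count_eq_zero, h]
  · simp [List.count_eq_zero, h]

-- ===== VERDICT (by name: the statement is the Claim_ definition above) =====
theorem reorder2_spec : Claim_equal_reorder2 := by
  intro m _
  unfold Spec_reorder2 reorder2 reorder2_alt
  set k : List Int → Bool := fun r => r.contains (-1) with hk
  rw [PySem.List.sorted_eq_foldl_insertBy]
  have hB := foldl_insertBy_partition k m [] [] (by simp) (by simp)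
  simp only [List.nil_append, List.append_nil] at hB
  rw [hB]
  have hA := foldl_partition (fun r => PySem.List.count r (-1) == 0)
      (PySem.List.enumerate m) [] []
  simp only [List.nil_append] at hA
  rw [hA]
  have hmap : (PySem.List.enumerate m).map (·.2) = m := PySem.List.map_snd_enumerate m 0
  rw [hmap]
  have h1 : m.filter (fun r => PySem.List.count r (-1) == 0) = m.filter (fun r => !k r) := by
    apply List.filter_congr; intro x _; exact count_eq_zero_iff_not_contains x ▸ (by simp [hk])
  have h2 : m.filter (fun r => !(PySem.List.count r (-1) == 0)) = m.filter k := by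
    apply List.filter_congr; intro x _; exact count_eq_zero_iff_not_contains x ▸ (by simp [hk])
  rw [h1, h2]
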